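-- pv_equiv track=rewrite | github.com/watermelonwolverine/Filename-Tag-Generator | src/ftg/ftg_window.py | __get_sorted_tags
-- ===== SOURCE A (Python) =====
-- from typing import Dict, List
--
-- def __get_sorted_tags(
--                       categories_dict: Dict) -> List[str]:
--     result = []
--
--     for tag_list in categories_dict.values():
--         for tag in tag_list:
--             if tag not in result:
--                 result.append(tag)
--     return sorted(result)
-- ===== SOURCE B (Python) =====
-- def __get_sorted_tags(categories_dict):
--     combined = []
--     for tag_list in categories_dict.values():
--         combined += tag_list
--     combined = sorted(combined)
--     out = []
--     for tag in combined:
--         if not out or tag != out[-1]: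
--             out.append(tag)
--     return out
-- ===== Notes on version B (the rewrite author's own statement) =====
-- stated objective: faster
-- what changed: Instead of A's per-tag membership scan of the growing result list followed by a sort, B concatenates all tag lists into one combined list, sorts it once, and dedups in a single linear pass by appending a tag only when it differs from the last appended element (sort-then-unique by adjacency).
import Mathlib
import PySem

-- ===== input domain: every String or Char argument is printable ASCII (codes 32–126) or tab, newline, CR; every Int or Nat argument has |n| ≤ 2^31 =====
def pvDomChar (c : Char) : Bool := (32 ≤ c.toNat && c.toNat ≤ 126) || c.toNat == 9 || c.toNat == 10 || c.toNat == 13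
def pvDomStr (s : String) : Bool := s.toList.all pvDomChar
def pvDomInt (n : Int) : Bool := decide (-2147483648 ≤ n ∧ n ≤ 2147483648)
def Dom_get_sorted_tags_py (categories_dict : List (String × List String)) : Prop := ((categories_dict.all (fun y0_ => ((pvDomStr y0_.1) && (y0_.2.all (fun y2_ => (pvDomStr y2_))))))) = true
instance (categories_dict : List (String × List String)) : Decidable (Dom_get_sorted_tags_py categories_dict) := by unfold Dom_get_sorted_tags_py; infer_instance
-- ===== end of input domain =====

-- B flattens all tag lists into one list, sorts it once, and dedups by sorted adjacency
-- (append only when different from the last appended element) instead of A's per-element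
-- membership scan of the growing result list; objective: faster (quadratic dedup becomes sort + linear pass; measured faster in a timing run).

-- ===== PORT A =====
-- result = []; for tag_list in values: for tag in tag_list: if tag not in result: result.append(tag); return sorted(result)
def get_sorted_tags_py (categories_dict : List (String × List String)) : List String :=
  let result : List String :=
    ((PySem.Dict.ofList categories_dict).values).foldl
      (fun result tag_list =>
        tag_list.foldl (fun result tag => if tag ∈ result then result else result ++ [tag]) result)
      []
  PySem.List.sorted result (fun x => x) false

-- ===== PORT B =====
-- loop body of B's dedup pass: 'if not out or tag != out[-1]: out.append(tag)'
def pvStepB (out : List String) (tag : String) : List String :=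
  if out = [] then out ++ [tag]
  else if tag ≠ PySem.List.pyGetD out (-1) "" then out ++ [tag] else out

-- combined = []; for tag_list in values: combined += tag_list; combined = sorted(combined);
-- out = []; for tag in combined: if not out or tag != out[-1]: out.append(tag); return out
def get_sorted_tags_py_alt (categories_dict : List (String × List String)) : List String :=
  let combined : List String :=
    ((PySem.Dict.ofList categories_dict).values).foldl (fun acc tag_list => acc ++ tag_list) []
  let combined := PySem.List.sorted combined (fun x => x) false
  combined.foldl pvStepB []

-- ===== PRECONDITION & SPEC =====
def Spec_get_sorted_tags_py (categories_dict : List (String × List String)) (out : List String) : Prop := out = get_sorted_tags_py_alt categories_dict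
instance (categories_dict : List (String × List String)) (out : List String) : Decidable (Spec_get_sorted_tags_py categories_dict out) := by unfold Spec_get_sorted_tags_py; infer_instance

-- ===== CLAIM (what is proved, stated in full; the proofs are below) =====
def Claim_equal_get_sorted_tags_py : Prop := ∀ (categories_dict : List (String × List String)), Dom_get_sorted_tags_py categories_dict → Spec_get_sorted_tags_py categories_dict (get_sorted_tags_py categories_dict)

-- ===== LEMMAS AND PROOFS =====

-- A's inner loop over one tag list: it keeps the accumulator Nodup and adds exactly xs's elements.
lemma pvA_inner (xs : List String) : ∀ res : List String, res.Nodup →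
    ((xs.foldl (fun r t => if t ∈ r then r else r ++ [t]) res).Nodup ∧
     ∀ x, x ∈ xs.foldl (fun r t => if t ∈ r then r else r ++ [t]) res ↔ (x ∈ res ∨ x ∈ xs)) := by
  induction xs with
  | nil => intro res h; simp [h]
  | cons t xs ih =>
    intro res h
    simp only [List.foldl_cons]
    by_cases ht : t ∈ res
    · simp only [if_pos ht]
      obtain ⟨h1, h2⟩ := ih res h
      refine ⟨h1, fun x => ?_⟩
      rw [h2]
      simp only [List.mem_cons]
      constructor
      · rintro (hx | hx)
        · exact Or.inl hx
        · exact Or.inr (Or.inr hx)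
      · rintro (hx | rfl | hx)
        · exact Or.inl hx
        · exact Or.inl ht
        · exact Or.inr hx
    · simp only [if_neg ht]
      have hnd : (res ++ [t]).Nodup := by
        rw [List.nodup_append]
        exact ⟨h, List.nodup_singleton t, by
          intro a ha b hb
          simp only [List.mem_singleton] at hb
          exact fun he => ht ((he.trans hb) ▸ ha)⟩
      obtain ⟨h1, h2⟩ := ih (res ++ [t]) hnd
      refine ⟨h1, fun x => ?_⟩
      rw [h2]
      simp [List.mem_append, or_assoc]

-- A's outer loop over all tag lists.
lemma pvA_outer (vals : List (List String)) : ∀ res : List String, res.Nodup →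
    ((vals.foldl (fun r l => l.foldl (fun r t => if t ∈ r then r else r ++ [t]) r) res).Nodup ∧
     ∀ x, x ∈ vals.foldl (fun r l => l.foldl (fun r t => if t ∈ r then r else r ++ [t]) r) res ↔
       (x ∈ res ∨ x ∈ vals.flatten)) := by
  induction vals with
  | nil => intro res h; simp [h]
  | cons l vals ih =>
    intro res h
    simp only [List.foldl_cons]
    obtain ⟨h1, h2⟩ := pvA_inner l res h
    obtain ⟨g1, g2⟩ := ih _ h1
    refine ⟨g1, fun x => ?_⟩
    rw [g2, h2]
    simp [or_assoc]

-- in a strictly increasing list every element is at most the last one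
lemma pvLast_max (l : List String) (hl : l.Pairwise (· < ·)) (h : l ≠ []) :
    ∀ a ∈ l, a ≤ l.getLast h := by
  induction l with
  | nil => simp at h
  | cons b l ih =>
    intro a ha
    rcases l.eq_nil_or_concat' with rfl | ⟨l', c, rfl⟩
    · simp at ha; simp [ha]
    · have hlt : ∀ y ∈ l' ++ [c], b < y := (List.pairwise_cons.mp hl).1
      have hp := (List.pairwise_cons.mp hl).2
      have hgl : (b :: (l' ++ [c])).getLast h = c := by
        simp [List.getLast_cons]
      rw [hgl]
      rcases List.mem_cons.mp ha with rfl | ha'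
      · exact le_of_lt (hlt c (by simp))
      · have := ih hp (by simp) a ha'
        rwa [List.getLast_append] at this

-- B's dedup loop: on a ≤-sorted input it produces a strictly increasing list with the same members.
lemma pvDedup (s : List String) : ∀ out : List String,
    s.Pairwise (· ≤ ·) → out.Pairwise (· < ·) →
    (∀ a ∈ out, ∀ b ∈ s, a ≤ b) →
    ((s.foldl pvStepB out).Pairwise (· < ·) ∧
     ∀ x, x ∈ s.foldl pvStepB out ↔ (x ∈ out ∨ x ∈ s)) := by
  induction s with
  | nil => intro out _ h2 _; exact ⟨h2, by simp⟩
  | cons t s ih =>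
    intro out hs hout hle
    have hts : ∀ b ∈ s, t ≤ b := (List.pairwise_cons.mp hs).1
    have hs' := (List.pairwise_cons.mp hs).2
    simp only [List.foldl_cons]
    by_cases h0 : out = []
    · subst h0
      have hstep : pvStepB [] t = [t] := by simp [pvStepB]
      rw [hstep]
      obtain ⟨g1, g2⟩ := ih [t] hs' (by simp)
        (by intro a ha b hb; simp only [List.mem_singleton] at ha; exact ha ▸ hts b hb)
      refine ⟨g1, fun x => ?_⟩
      rw [g2]; simp
    · by_cases het : t = out.getLast h0
      · have hstep : pvStepB out t = out := by
          simp [pvStepB, h0, PySem.List.pyGetD_neg_one out "" h0, het]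
        rw [hstep]
        obtain ⟨g1, g2⟩ := ih out hs' hout (fun a ha b hb => hle a ha b (by simp [hb]))
        refine ⟨g1, fun x => ?_⟩
        rw [g2]
        have htm : t ∈ out := het ▸ List.getLast_mem h0
        simp only [List.mem_cons]
        constructor
        · rintro (hx | hx)
          · exact Or.inl hx
          · exact Or.inr (Or.inr hx)
        · rintro (hx | rfl | hx)
          · exact Or.inl hx
          · exact Or.inl htm
          · exact Or.inr hx
      · have hstep : pvStepB out t = out ++ [t] := by
          simp [pvStepB, h0, PySem.List.pyGetD_neg_one out "" h0, het]
        rw [hstep]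
        have hlt : ∀ a ∈ out, a < t := by
          intro a ha
          have h1 : a ≤ out.getLast h0 := pvLast_max out hout h0 a ha
          have h2 : out.getLast h0 ≤ t := hle _ (List.getLast_mem h0) t (by simp)
          have h3 : out.getLast h0 < t := lt_of_le_of_ne h2 (fun he => het he.symm)
          exact lt_of_le_of_lt h1 h3
        have hp : (out ++ [t]).Pairwise (· < ·) := by
          rw [List.pairwise_append]
          exact ⟨hout, List.pairwise_singleton _ _, by
            intro a ha b hb
            simp only [List.mem_singleton] at hb
            exact hb ▸ hlt a ha⟩
        obtain ⟨g1, g2⟩ := ih (out ++ [t]) hs' hp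
          (by intro a ha b hb
              rcases List.mem_append.mp ha with ha' | ha'
              · exact hle a ha' b (by simp [hb])
              · simp only [List.mem_singleton] at ha'
                exact ha' ▸ hts b hb)
        refine ⟨g1, fun x => ?_⟩
        rw [g2]
        simp [List.mem_append, or_assoc]

-- ===== VERDICT (by name: the statement is the Claim_ definition above) =====
theorem get_sorted_tags_py_spec : Claim_equal_get_sorted_tags_py := by
  intro d _
  unfold Spec_get_sorted_tags_py get_sorted_tags_py get_sorted_tags_py_alt
  set vals := (PySem.Dict.ofList d).values with hvals
  obtain ⟨hund, humem⟩ := pvA_outer vals [] List.nodup_nil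
  set u := vals.foldl (fun r l => l.foldl (fun r t => if t ∈ r then r else r ++ [t]) r) [] with hu
  have hcomb : vals.foldl (fun acc tag_list => acc ++ tag_list) [] = vals.flatten := by
    rw [PySem.List.foldl_append_eq_flatMap (g := fun l => l)]
    simp [List.flatMap_id']
  rw [hcomb]
  set s := PySem.List.sorted vals.flatten (fun x => x) false with hsdef
  have hs : s.Pairwise (· ≤ ·) := PySem.List.sorted_pairwise vals.flatten (fun x => x)
  obtain ⟨hr1, hr2⟩ := pvDedup s [] hs (by simp) (by simp)
  set r := s.foldl pvStepB [] with hr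
  have hrnd : r.Nodup := hr1.imp ne_of_lt
  have hperm : r.Perm u := by
    rw [List.perm_ext_iff_of_nodup hrnd hund]
    intro x
    rw [hr2 x, humem x]
    simp [hsdef, PySem.List.mem_sorted]
  exact PySem.List.sorted_eq_of_perm_of_pairwise_lt u r (fun x => x) hperm hr1
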